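-- pv_equiv track=rewrite | github.com/Vignesh-1101/DSA-PYTHON | Python/sum_of_numbers.py | maxStones
-- ===== SOURCE A (Python) =====
-- def maxStones(piles):
--     group1 = []
--     group2 = []
--     for i in range(len(piles)):
--         if i % 2 == 0:
--             group1.append(piles[i])
--         else:
--             group2.append(piles[i])
--
--     group1.sort(reverse=True)
--     group2.sort(reverse=True)
--     return group1[1] + group2[1]
-- ===== SOURCE B (Python) =====
-- def maxStones(piles):
--     """Sum of the second-largest values among even-indexed and odd-indexed elements."""
--     even = (None, None)   # (largest, second largest) at even indices
--     odd = (None, None)    # (largest, second largest) at odd indices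
--     p = 0
--     for v in piles:
--         m1, m2 = even if p == 0 else odd
--         if m1 is None or m1 < v:
--             new = (v, m1)
--         elif m2 is None or m2 < v:
--             new = (m1, v)
--         else:
--             new = (m1, m2)
--         if p == 0:
--             even = new
--         else:
--             odd = new
--         p = 1 - p
--     return even[1] + odd[1]
-- ===== Notes on version B (the rewrite author's own statement) =====
-- stated objective: alternative
-- what changed: Replaces building two index-parity groups and fully sorting each with a single pass that maintains the top-two values per parity class and sums the two second maxima; Pre_ excludes lists shorter than 4, on which A raises IndexError (some parity group has fewer than two elements).
import Mathlib
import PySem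

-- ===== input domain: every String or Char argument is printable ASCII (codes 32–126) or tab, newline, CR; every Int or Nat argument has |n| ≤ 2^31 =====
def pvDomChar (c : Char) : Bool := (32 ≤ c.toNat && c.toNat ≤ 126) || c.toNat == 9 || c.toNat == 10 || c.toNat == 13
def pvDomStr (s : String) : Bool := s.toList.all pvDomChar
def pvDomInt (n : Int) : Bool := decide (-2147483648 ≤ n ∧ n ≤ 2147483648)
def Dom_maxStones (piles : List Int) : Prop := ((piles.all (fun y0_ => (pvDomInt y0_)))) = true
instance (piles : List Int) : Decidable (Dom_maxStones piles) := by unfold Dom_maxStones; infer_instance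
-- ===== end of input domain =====

-- B replaces group-build + two full descending sorts with a single pass keeping the top-two
-- values per index-parity class (alternative decomposition; same return values on Pre_).


-- ===== PORT A =====
-- group1[1]/group2[1] raise IndexError when the group is shorter than 2 (i.e. len(piles) < 4);
-- those inputs are excluded by Pre_, the port returns 0 there.
def maxStones (piles : List Int) : Int :=
  let g := (PySem.List.pyRange 0 (PySem.List.len piles) 1).foldl
    (fun (g : List Int × List Int) i =>
      if PySem.Int.mod i 2 == 0 then (g.1 ++ [PySem.List.pyGetD piles i 0], g.2)
      else (g.1, g.2 ++ [PySem.List.pyGetD piles i 0])) ([], [])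
  let g1s := PySem.List.sorted g.1 (fun x => x) true
  let g2s := PySem.List.sorted g.2 (fun x => x) true
  match PySem.List.pyGet? g1s 1, PySem.List.pyGet? g2s 1 with
  | some a, some b => a + b
  | _, _ => 0

-- ===== PORT B =====
-- the loop body of Source B: update a (largest, second-largest) pair with a new value
def pvStep (s : Option Int × Option Int) (v : Int) : Option Int × Option Int :=
  match s.1 with
  | none => (some v, s.1)
  | some m1 =>
    if m1 < v then (some v, some m1)
    else match s.2 with
      | none => (some m1, some v)
      | some b => if b < v then (some m1, some v) else (some m1, some b)

-- Source B's final 'even[1] + odd[1]' is only an int when both seconds exist (len(piles) ≥ 4);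
-- those are exactly the inputs Pre_ admits, the port returns 0 elsewhere.
def maxStones_alt (piles : List Int) : Int :=
  let r := piles.foldl
    (fun (st : Int × (Option Int × Option Int) × (Option Int × Option Int)) v =>
      if st.1 == 0 then (1 - st.1, pvStep st.2.1 v, st.2.2)
      else (1 - st.1, st.2.1, pvStep st.2.2 v))
    (0, (none, none), (none, none))
  match r.2.1.2 with
  | none => 0
  | some e2 =>
    match r.2.2.2 with
    | none => 0
    | some o2 => e2 + o2

-- ===== PRECONDITION & SPEC =====
-- Python A raises IndexError exactly when piles has fewer than 4 elements (some parity group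
-- then has fewer than 2 members); Pre_ excludes exactly those inputs.
def Pre_maxStones (piles : List Int) : Prop := 4 ≤ piles.length
instance (piles : List Int) : Decidable (Pre_maxStones piles) := by unfold Pre_maxStones; infer_instance
def pvWitness_maxStones : List Int := [3, 1, 4, 1, 5]

def Spec_maxStones (piles : List Int) (out : Int) : Prop := out = maxStones_alt piles
instance (piles : List Int) (out : Int) : Decidable (Spec_maxStones piles out) := by unfold Spec_maxStones; infer_instance

-- ===== CLAIM (what is proved, stated in full; the proofs are below) =====
def Claim_equal_maxStones : Prop := ∀ (piles : List Int), Dom_maxStones piles → Pre_maxStones piles → Spec_maxStones piles (maxStones piles)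

-- ===== LEMMAS AND PROOFS =====

-- the elements of xs at even (b = true) / odd (b = false) positions
def pvGroup (b : Bool) : List Int → List Int
  | [] => []
  | x :: xs => if b then x :: pvGroup false xs else pvGroup true xs

def pvFirstTwo (l : List Int) : Option Int × Option Int := (l[0]?, l[1]?)

theorem pvFirstTwo_insertBy (acc : List Int) (x : Int) :
    pvFirstTwo (PySem.List.insertBy (fun a b => decide (b < a)) x acc) =
      pvStep (pvFirstTwo acc) x := by
  match acc with
  | [] => simp [PySem.List.insertBy, pvFirstTwo, pvStep]
  | [a] =>
    by_cases h : a < x <;>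
      simp [PySem.List.insertBy, pvFirstTwo, pvStep, h]
  | a :: b :: t =>
    by_cases h1 : a < x <;> by_cases h2 : b < x <;>
      simp [PySem.List.insertBy, pvFirstTwo, pvStep, h1, h2]

theorem pvFirstTwo_foldl_insertBy (l : List Int) (acc : List Int) :
    pvFirstTwo (l.foldl (fun acc x => PySem.List.insertBy (fun a b => decide (b < a)) x acc) acc) =
      l.foldl pvStep (pvFirstTwo acc) := by
  induction l generalizing acc with
  | nil => rfl
  | cons x xs ih => simp only [List.foldl_cons, ih, pvFirstTwo_insertBy]

theorem pvFirstTwo_sorted (g : List Int) :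
    pvFirstTwo (PySem.List.sorted g (fun x => x) true) = g.foldl pvStep (none, none) := by
  rw [PySem.List.sorted_rev_eq_foldl_insertBy g (fun x => x)]
  simpa [pvFirstTwo] using pvFirstTwo_foldl_insertBy g []

-- splitting A's pair-accumulator fold into two independent folds
theorem pvFold_split {α : Type} (l : List α) (p : α → Bool) (f : α → Int) (a0 b0 : List Int) :
    (l.foldl (fun (g : List Int × List Int) (i : α) =>
        if p i then (g.1 ++ [f i], g.2) else (g.1, g.2 ++ [f i])) (a0, b0)) =
      (l.foldl (fun a i => if p i then a ++ [f i] else a) a0,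
       l.foldl (fun b i => if p i then b else b ++ [f i]) b0) := by
  induction l generalizing a0 b0 with
  | nil => rfl
  | cons x xs ih => by_cases h : p x <;> simp [List.foldl_cons, h, ih]

theorem pvRange_groups (xs : List Int) :
    (((List.range xs.length).filter (fun j => j % 2 == 0)).map (fun j => xs.getD j 0)
        = pvGroup true xs)
    ∧ (((List.range xs.length).filter (fun j => ¬ (j % 2 == 0))).map (fun j => xs.getD j 0)
        = pvGroup false xs) := by
  induction xs with
  | nil => simp [pvGroup]
  | cons x xs ih =>
    have hr : List.range (x :: xs).length = 0 :: (List.range xs.length).map (· + 1) := by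
      simp [List.range_succ_eq_map]
    have hf1 : ((List.range xs.length).map (· + 1)).filter (fun j => j % 2 == 0)
          = ((List.range xs.length).filter (fun j => ¬ (j % 2 == 0))).map (· + 1) := by
      rw [List.filter_map]
      congr 1
      apply List.filter_congr
      intro j _
      rcases Nat.mod_two_eq_zero_or_one j with h | h <;>
        simp [Function.comp_apply, Nat.add_mod, h]
    have hf2 : ((List.range xs.length).map (· + 1)).filter (fun j => ¬ (j % 2 == 0))
          = ((List.range xs.length).filter (fun j => j % 2 == 0)).map (· + 1) := by
      rw [List.filter_map]
      congr 1
      apply List.filter_congr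
      intro j _
      rcases Nat.mod_two_eq_zero_or_one j with h | h <;>
        simp [Function.comp_apply, Nat.add_mod, h]
    constructor
    · rw [hr, List.filter_cons]
      have h0 : (((0:Nat) % 2 == 0) = true) := rfl
      rw [if_pos h0, hf1, List.map_cons, List.map_map]
      show _ = pvGroup true (x :: xs)
      simp only [pvGroup, if_pos]
      rw [List.getD_cons_zero]
      congr 1
      rw [← ih.2]
      apply List.map_congr_left
      intro j _
      simp
    · rw [hr, List.filter_cons]
      have h0 : ¬ ((decide ¬(((0:Nat) % 2 == 0) = true)) = true) := by decide
      rw [if_neg h0, hf2, List.map_map]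
      show _ = pvGroup false (x :: xs)
      simp only [pvGroup]
      rw [← ih.1]
      apply List.map_congr_left
      intro j _
      simp

-- B's alternating fold computes the two per-parity folds
theorem pvAlt_fold (xs : List Int) (e o : Option Int × Option Int) :
    (xs.foldl (fun (st : Int × (Option Int × Option Int) × (Option Int × Option Int)) v =>
        if st.1 == 0 then (1 - st.1, pvStep st.2.1 v, st.2.2)
        else (1 - st.1, st.2.1, pvStep st.2.2 v)) (0, e, o)).2
      = ((pvGroup true xs).foldl pvStep e, (pvGroup false xs).foldl pvStep o)
    ∧ (xs.foldl (fun (st : Int × (Option Int × Option Int) × (Option Int × Option Int)) v =>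
        if st.1 == 0 then (1 - st.1, pvStep st.2.1 v, st.2.2)
        else (1 - st.1, st.2.1, pvStep st.2.2 v)) (1, e, o)).2
      = ((pvGroup false xs).foldl pvStep e, (pvGroup true xs).foldl pvStep o) := by
  induction xs generalizing e o with
  | nil => simp [pvGroup]
  | cons x xs ih =>
    refine ⟨?_, ?_⟩
    · simpa [pvGroup] using (ih (pvStep e x) o).2
    · simpa [pvGroup] using (ih e (pvStep o x)).1

-- A's grouping loop produces exactly the two parity groups
theorem pvA_groups (piles : List Int) :
    ((PySem.List.pyRange 0 (PySem.List.len piles) 1).foldl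
      (fun (g : List Int × List Int) i =>
        if PySem.Int.mod i 2 == 0 then (g.1 ++ [PySem.List.pyGetD piles i 0], g.2)
        else (g.1, g.2 ++ [PySem.List.pyGetD piles i 0])) ([], []))
      = (pvGroup true piles, pvGroup false piles) := by
  have hlen : PySem.List.len piles = (piles.length : Int) := by
    simp [PySem.List.len]
  rw [hlen, PySem.List.pyRange_one 0 piles.length]
  simp only [zero_add, Int.sub_zero, Int.toNat_natCast, List.foldl_map]
  have hbody : ∀ (g : List Int × List Int), ∀ j ∈ List.range piles.length,
      (if PySem.Int.mod (j : Int) 2 == 0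
        then (g.1 ++ [PySem.List.pyGetD piles (j : Int) 0], g.2)
        else (g.1, g.2 ++ [PySem.List.pyGetD piles (j : Int) 0]))
      = (if (j % 2 == 0 : Bool)
          then (g.1 ++ [piles.getD j 0], g.2) else (g.1, g.2 ++ [piles.getD j 0])) := by
    intro g j _
    have hmod : (PySem.Int.mod (j : Int) 2 == 0) = (j % 2 == 0 : Bool) := by
      have hm : PySem.Int.mod (j : Int) 2 = ((j % 2 : Nat) : Int) := by
        simp [PySem.Int.mod, Int.fmod_eq_emod]
      rw [hm]
      by_cases h : j % 2 = 0 <;> simp [h]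
      omega
    have hget : PySem.List.pyGetD piles (j : Int) 0 = piles.getD j 0 := by
      simp
    rw [hmod, hget]
  rw [PySem.List.foldl_congr_mem (List.range piles.length) _ _ ([], []) hbody]
  rw [pvFold_split]
  rw [PySem.List.foldl_append_if (fun j => j % 2 == 0) (fun j => piles.getD j 0)]
  have h2 : (List.foldl (fun b j => if (j % 2 == 0 : Bool) then b else b ++ [piles.getD j 0]) []
      (List.range piles.length))
      = List.map (fun j => piles.getD j 0)
          (List.filter (fun j => ¬ (j % 2 == 0)) (List.range piles.length)) := by
    have halt := PySem.List.foldl_append_if (fun j => ¬ (j % 2 == 0) : Nat → Bool)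
      (fun j => piles.getD j 0) (List.range piles.length) []
    simp only [List.nil_append] at halt
    rw [← halt]
    apply PySem.List.foldl_congr_mem
    intro b j _
    by_cases h : (j % 2 == 0 : Bool) <;> simp [h]
  rw [h2]
  simp only [List.nil_append]
  rw [(pvRange_groups piles).1, (pvRange_groups piles).2]

-- ===== VERDICT (by name: the statement is the Claim_ definition above) =====
theorem maxStones_spec : Claim_equal_maxStones := by
  intro piles _ _
  unfold Spec_maxStones maxStones maxStones_alt
  rw [pvA_groups piles]
  have he := pvFirstTwo_sorted (pvGroup true piles)
  have ho := pvFirstTwo_sorted (pvGroup false piles)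
  have hB := (pvAlt_fold piles (none, none) (none, none)).1
  simp only [hB]
  have h1 : PySem.List.pyGet? (PySem.List.sorted (pvGroup true piles) (fun x => x) true) 1
      = ((pvGroup true piles).foldl pvStep (none, none)).2 := by
    rw [← he, pvFirstTwo]
    simpa using PySem.List.pyGet?_natCast (PySem.List.sorted (pvGroup true piles) (fun x => x) true) 1
  have h2 : PySem.List.pyGet? (PySem.List.sorted (pvGroup false piles) (fun x => x) true) 1
      = ((pvGroup false piles).foldl pvStep (none, none)).2 := by
    rw [← ho, pvFirstTwo]
    simpa using PySem.List.pyGet?_natCast (PySem.List.sorted (pvGroup false piles) (fun x => x) true) 1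
  rw [h1, h2]
  cases ((pvGroup true piles).foldl pvStep (none, none)).2 <;>
    cases ((pvGroup false piles).foldl pvStep (none, none)).2 <;> rfl
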